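-- pv_equiv track=rewrite | github.com/Marc416/ndb_algorithm | AlgorithmStudy/Part3/1. 그리디/6. 무지의 먹방라이브 - 이분탐색.py | solution
-- ===== SOURCE A (Python) =====
-- def solution(food_times, k):
--     if k >= sum(food_times):
--         return -1
--
--     # low, high = 1, 8  # 문제에서 주어진 원소의 최소, 최댓값
--     low, high = 0, 1000000000  # 문제에서 주어진 원소의 최소, 최댓값
--     laps, total_times, food_count = 0, 0, len(food_times)  # 바퀴 수, 총 시간, 음식 수
--
--     # while 문의 목표 : 이분탐색으로 k초 보다 적은 초를 구한다.
--     while low <= high: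
--         # 음식 유무와 상관없이 모든 음식을 다 먹는다고 가정하고
--         # k초에 도달 할 때까지 몇바퀴를 도는지 이분탐색으로 찾기
--         mid_laps = (low + high) // 2
--
--         # laps 만큼 모든 음식을 다 먹을 때에 걸리는 시간
--         # k 초 이하로 먹을때까지 찾는다.
--         times = food_count * mid_laps
--
--         # 건너뛰어야 하는 음식의 초수를 times 에 더해줘서 간극을 맞춘다.
--         for f_time in food_times:
--             cnt = f_time - mid_laps
--             if cnt < 0:
--                 times += cnt
--
--         if times <= k:  # 총 시간이 k보다 작거나 같다면, 우리가 원하는 바퀴 수일 수 있으니 각각 저장해준다.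
--             laps, total_times = mid_laps, times
--             low = mid_laps + 1  # k보다 작으면서 최대인 값이 아닐 수 있으므로 다시 이분 탐색
--         else:
--             high = mid_laps - 1
--
--     # 최대 laps 만큼 초가 제거된 food_times 로 갱신한다.
--     # 음수인 초가 있겠지만 while 문에서 이미 최적해를 걸러왔으므로 양수의 음식들만 다시 탐색하면 된다.
--     food_times = [time - laps for time in food_times]
--
--     for i in range(food_count):
--         # 음수인 경우 제외
--         if food_times[i] <= 0:
--             continue
--
--         if food_times[i] > 0 and total_times == k:  # 음식이 남아 있고, 총 시간이 k를 만족할 경우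
--             return i + 1  # 현재 인덱스+1을 출력(0부터 시작하기 떄문)
--         else:
--             # 음식이 남아 있는 경우만 총 시간에 +1
--             total_times += 1
--     return -1
-- ===== SOURCE B (Python) =====
-- def solution(food_times, k):
--     if k >= sum(food_times):
--         return -1
--     # time already spent even at level 0 (non-positive "food times" contribute fully)
--     base = sum(t for t in food_times if t <= 0)
--     if k < base:
--         return -1
--     pos = sorted(t for t in food_times if t > 0)
--     elapsed, prev, remaining = base, 0, len(pos)
--     for p in pos:
--         cost = (p - prev) * remaining
--         if elapsed + cost > k:
--             break
--         elapsed += cost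
--         prev = p
--         remaining -= 1
--     laps = prev + (k - elapsed) // remaining
--     rem = k - (elapsed + (laps - prev) * remaining)
--     for i, t in enumerate(food_times):
--         if t > laps:
--             if rem == 0:
--                 return i + 1
--             rem -= 1
--     return -1
-- ===== Notes on version B (the rewrite author's own statement) =====
-- stated objective: alternative
-- what changed: Replaces A's 0..10^9 binary search over the lap count (each probe rescanning all foods) by a single sort of the positive food times and one sweep that consumes whole levels, computing the maximal lap count and remainder in closed form.
-- intended difference: On inputs needing more than 10^9 full laps (k >= sum(min(f,10^9+1)) but k < sum(food_times)), A's search is capped at 10^9 laps and returns -1 although food remains; B returns the index of the food actually being eaten at second k, which is the intended answer. — e.g. on solution([2000000002], 2000000001): A returns -1, B returns 1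
import Mathlib
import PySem

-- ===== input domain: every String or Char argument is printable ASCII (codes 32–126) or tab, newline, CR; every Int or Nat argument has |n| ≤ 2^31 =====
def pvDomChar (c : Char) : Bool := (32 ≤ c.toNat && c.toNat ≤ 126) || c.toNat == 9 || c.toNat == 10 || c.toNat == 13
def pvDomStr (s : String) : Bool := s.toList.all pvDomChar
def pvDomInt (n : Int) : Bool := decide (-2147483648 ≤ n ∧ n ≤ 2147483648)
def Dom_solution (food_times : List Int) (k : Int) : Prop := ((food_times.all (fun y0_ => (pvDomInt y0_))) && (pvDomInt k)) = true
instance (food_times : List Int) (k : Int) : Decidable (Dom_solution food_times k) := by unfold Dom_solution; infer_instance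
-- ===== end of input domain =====

-- B replaces A's 0..10^9 binary search over the lap count by a single sort-and-sweep over the
-- food times (alternative algorithm; return value only, neither program mutates its input).

-- ===== PORT A =====
-- times = food_count*mid; for f in food_times: cnt = f - mid; if cnt < 0: times += cnt
def aTimes (food_times : List Int) (mid : Int) : Int :=
  food_times.foldl (fun times f => if f - mid < 0 then times + (f - mid) else times)
    ((food_times.length : Int) * mid)

-- the while low <= high binary search, carrying (laps, total_times)
def aLoop (food_times : List Int) (k low high laps total : Int) : Int × Int :=
  if h : low ≤ high then
    if aTimes food_times (PySem.Int.floordiv (low + high) 2) ≤ k then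
      aLoop food_times k (PySem.Int.floordiv (low + high) 2 + 1) high
        (PySem.Int.floordiv (low + high) 2) (aTimes food_times (PySem.Int.floordiv (low + high) 2))
    else aLoop food_times k low (PySem.Int.floordiv (low + high) 2 - 1) laps total
  else (laps, total)
termination_by (high + 1 - low).toNat
decreasing_by
  · have := PySem.Int.floordiv_two_mid_bounds h; omega
  · have := PySem.Int.floordiv_two_mid_bounds h; omega

-- the final for-loop over the laps-reduced list (i is the running original index)
def aWalk (fts : List Int) (i k total : Int) : Int :=
  match fts with
  | [] => -1
  | f :: rest =>
    if f ≤ 0 then aWalk rest (i + 1) k total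
    else if 0 < f ∧ total = k then i + 1
    else aWalk rest (i + 1) k (total + 1)

def solution (food_times : List Int) (k : Int) : Int :=
  if food_times.sum ≤ k then -1
  else
    match aLoop food_times k 0 1000000000 0 0 with
    | (laps, total) => aWalk (food_times.map (fun t => t - laps)) 0 k total

-- ===== PORT B =====
-- sweep the sorted positive times, consuming whole "levels" while they fit in k
def bSweep (pos : List Int) (k e prev r : Int) : Int × Int × Int :=
  match pos with
  | [] => (e, prev, r)
  | p :: rest =>
    if k < e + (p - prev) * r then (e, prev, r)
    else bSweep rest k (e + (p - prev) * r) p (r - 1)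

-- walk the ORIGINAL list: the rem-th surviving food (time > laps) wins
def bWalk (fts : List Int) (i laps rem : Int) : Int :=
  match fts with
  | [] => -1
  | t :: rest =>
    if laps < t then
      if rem = 0 then i + 1 else bWalk rest (i + 1) laps (rem - 1)
    else bWalk rest (i + 1) laps rem

def solution_alt (food_times : List Int) (k : Int) : Int :=
  if food_times.sum ≤ k then -1
  else if k < (food_times.filter (fun t => t ≤ 0)).sum then -1
  else
    match bSweep (PySem.List.sorted (food_times.filter (fun t => 0 < t)) (fun x => x) false) k
        ((food_times.filter (fun t => t ≤ 0)).sum) 0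
        (((PySem.List.sorted (food_times.filter (fun t => 0 < t)) (fun x => x) false).length : Int)) with
    | (e, prev, r) =>
      bWalk food_times 0 (prev + PySem.Int.floordiv (k - e) r)
        (k - (e + ((prev + PySem.Int.floordiv (k - e) r) - prev) * r))

-- ===== PRECONDITION & SPEC =====
-- On inputs needing more than 10^9 full laps (k below the total sum but at least Σ min(f,10^9+1)),
-- A's binary search is capped at 10^9 laps and A returns -1 although food remains; B returns the
-- intended surviving food's index.
def D_solution (food_times : List Int) (k : Int) : Prop :=
  k < food_times.sum ∧ (food_times.map (fun f => min f 1000000001)).sum ≤ k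
instance (food_times : List Int) (k : Int) : Decidable (D_solution food_times k) := by
  unfold D_solution; infer_instance

def Spec_solution (food_times : List Int) (k : Int) (out : Int) : Prop :=
  ¬ D_solution food_times k → out = solution_alt food_times k
instance (food_times : List Int) (k : Int) (out : Int) : Decidable (Spec_solution food_times k out) := by
  unfold Spec_solution; infer_instance

def pvDiffWitness_solution : List Int × Int := ([2000000002], 2000000001)
def pvDiffWitnessOut_solution : Int × Int := (-1, 1)

-- ===== CLAIM (what is proved, stated in full; the proofs are below) =====
def Claim_unchanged_solution : Prop := ∀ (food_times : List Int) (k : Int), Dom_solution food_times k → Spec_solution food_times k (solution food_times k)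
def Claim_changed_solution : Prop := Dom_solution (pvDiffWitness_solution.1) (pvDiffWitness_solution.2) ∧ D_solution (pvDiffWitness_solution.1) (pvDiffWitness_solution.2) ∧ solution (pvDiffWitness_solution.1) (pvDiffWitness_solution.2) = pvDiffWitnessOut_solution.1 ∧ solution_alt (pvDiffWitness_solution.1) (pvDiffWitness_solution.2) = pvDiffWitnessOut_solution.2 ∧ pvDiffWitnessOut_solution.1 ≠ pvDiffWitnessOut_solution.2
def Claim_exact_solution : Prop := ∀ (food_times : List Int) (k : Int), Dom_solution food_times k → D_solution food_times k → solution food_times k ≠ solution_alt food_times k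

-- ===== LEMMAS AND PROOFS =====

-- SF ft L = Σ min(f, L) : the seconds spent after L full laps over every food
def SF (ft : List Int) (L : Int) : Int := (ft.map (fun f => min f L)).sum

theorem SF_mono (ft : List Int) {L L' : Int} (h : L ≤ L') : SF ft L ≤ SF ft L' := by
  induction ft with
  | nil => simp [SF]
  | cons f rest ih =>
    simp only [SF, List.map_cons, List.sum_cons] at *
    have : min f L ≤ min f L' := by omega
    omega

theorem aTimes_aux (mid : Int) (ft : List Int) : ∀ init : Int,
    ft.foldl (fun times f => if f - mid < 0 then times + (f - mid) else times) init
      = init + SF ft mid - (ft.length : Int) * mid := by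
  induction ft with
  | nil => intro init; simp [SF]
  | cons f rest ih =>
    intro init
    simp only [List.foldl_cons, ih, SF, List.map_cons, List.sum_cons, List.length_cons]
    by_cases h : f - mid < 0
    · simp only [if_pos h]
      have : min f mid = f := by omega
      rw [this]; push_cast; ring
    · simp only [if_neg h]
      have : min f mid = mid := by omega
      rw [this]; push_cast; ring

theorem aTimes_eq (ft : List Int) (mid : Int) : aTimes ft mid = SF ft mid := by
  unfold aTimes; rw [aTimes_aux]; ring

theorem aLoop_spec (ft : List Int) (k : Int) (hk0 : SF ft 0 ≤ k) :
    ∀ n : Nat, ∀ low high laps total : Int, (high + 1 - low).toNat = n →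
    0 ≤ low → low ≤ high + 1 →
    (∀ L, high < L → k < SF ft L) →
    (0 < low → laps = low - 1 ∧ total = SF ft (low - 1) ∧ SF ft (low - 1) ≤ k) →
    (low = 0 → laps = 0 ∧ total = 0) →
    ∃ l, aLoop ft k low high laps total = (l, SF ft l) ∧ 0 ≤ l ∧ SF ft l ≤ k ∧
      ∀ L, l < L → k < SF ft L := by
  intro n
  induction n using Nat.strong_induction_on with
  | _ n ih =>
    intro low high laps total hn hlow0 hlh inv3 invP inv0
    rw [aLoop]
    by_cases h : low ≤ high
    · rw [dif_pos h]
      have hmid := PySem.Int.floordiv_two_mid_bounds h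
      set mid := PySem.Int.floordiv (low + high) 2 with hm
      rw [aTimes_eq]
      by_cases ht : SF ft mid ≤ k
      · rw [if_pos ht]
        refine ih (high + 1 - (mid + 1)).toNat (by omega) (mid + 1) high mid (SF ft mid)
          rfl (by omega) (by omega) inv3 ?_ (by omega)
        intro _; exact ⟨by ring, by norm_num, by simpa using ht⟩
      · rw [if_neg ht]
        refine ih (mid - 1 + 1 - low).toNat (by omega) low (mid - 1) laps total
          rfl hlow0 (by omega) ?_ invP inv0
        intro L hL
        by_cases hLh : high < L
        · exact inv3 L hLh
        · have : SF ft mid ≤ SF ft L := SF_mono ft (by omega)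
          omega
    · rw [dif_neg h]
      by_cases hl0 : low = 0
      · exfalso
        have := inv3 0 (by omega)
        omega
      · obtain ⟨h1, h2, h3⟩ := invP (by omega)
        refine ⟨low - 1, by rw [h1, h2], by omega, h3, ?_⟩
        intro L hL
        exact inv3 L (by omega)

theorem aLoop_none (ft : List Int) (k : Int) (hk0 : k < SF ft 0) :
    ∀ n : Nat, ∀ low high laps total : Int, (high + 1 - low).toNat = n → 0 ≤ low →
    aLoop ft k low high laps total = (laps, total) := by
  intro n
  induction n using Nat.strong_induction_on with
  | _ n ih =>
    intro low high laps total hn hlow0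
    rw [aLoop]
    by_cases h : low ≤ high
    · rw [dif_pos h]
      have hmid := PySem.Int.floordiv_two_mid_bounds h
      set mid := PySem.Int.floordiv (low + high) 2
      rw [aTimes_eq]
      have : SF ft 0 ≤ SF ft mid := SF_mono ft (by omega)
      rw [if_neg (by omega)]
      exact ih (mid - 1 + 1 - low).toNat (by omega) low (mid - 1) laps total rfl hlow0
    · rw [dif_neg h]

-- helper facts about SF
theorem SF_all_ge (L : Int) (ft : List Int) (h : ∀ f ∈ ft, L ≤ f) :
    SF ft L = (ft.length : Int) * L := by
  induction ft with
  | nil => simp [SF]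
  | cons f rest ih =>
    have hf : L ≤ f := h f (by simp)
    have hm : min f L = L := by omega
    simp only [SF, List.map_cons, List.sum_cons, List.length_cons, hm] at *
    rw [ih (fun x hx => h x (by simp [hx]))]
    push_cast; ring

theorem SF_all_le (L : Int) (ft : List Int) (h : ∀ f ∈ ft, f ≤ L) : SF ft L = ft.sum := by
  induction ft with
  | nil => simp [SF]
  | cons f rest ih =>
    have hf : f ≤ L := h f (by simp)
    have hm : min f L = f := by omega
    simp only [SF, List.map_cons, List.sum_cons, hm] at *
    rw [ih (fun x hx => h x (by simp [hx]))]

theorem SF_split (ft : List Int) (L : Int) (hL : 0 ≤ L) :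
    SF ft L = (ft.filter (fun t => t ≤ 0)).sum + SF (ft.filter (fun t => 0 < t)) L := by
  induction ft with
  | nil => simp [SF]
  | cons f rest ih =>
    by_cases h : f ≤ 0
    · have h1 : min f L = f := by omega
      simp only [SF, List.map_cons, List.sum_cons, List.filter_cons, h1] at *
      rw [if_pos (by simpa using h), if_neg (by simp; omega)]
      simp only [List.sum_cons]
      omega
    · simp only [SF, List.map_cons, List.sum_cons, List.filter_cons] at *
      rw [if_neg (by simpa using h), if_pos (by simp; omega)]
      simp only [List.map_cons, List.sum_cons]
      omega

theorem SF_perm {xs ys : List Int} (h : xs.Perm ys) (L : Int) : SF xs L = SF ys L :=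
  List.Perm.sum_eq (List.Perm.map _ h)

-- an upper bound for all elements, at least a given start
def ubOf (start : Int) (ft : List Int) : Int := ft.foldr (fun a b => max a b) start

theorem ubOf_spec (start : Int) (ft : List Int) :
    start ≤ ubOf start ft ∧ ∀ f ∈ ft, f ≤ ubOf start ft := by
  induction ft with
  | nil => simp [ubOf]
  | cons f rest ih =>
    simp only [ubOf, List.foldr_cons] at *
    refine ⟨by omega, ?_⟩
    intro x hx
    rcases List.mem_cons.mp hx with h | h
    · omega
    · have := ih.2 x h; omega

-- bSweep invariant lemma, with g the (monotone) global time function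
theorem bSweep_spec (g : Int → Int) (k : Int) :
    ∀ pos : List Int, ∀ e prev r : Int,
    r = (pos.length : Int) → 0 ≤ prev → e ≤ k →
    pos.Pairwise (· ≤ ·) → (∀ p ∈ pos, prev ≤ p) →
    (∀ L, prev ≤ L → g L = (e - r * prev) + SF pos L) →
    ∃ e' prev' r', bSweep pos k e prev r = (e', prev', r') ∧ 0 ≤ prev' ∧ e' ≤ k ∧
      ((r' = 0 ∧ ∀ L, prev' ≤ L → g L = e') ∨
       (∃ p, 1 ≤ r' ∧ prev' ≤ p ∧
         (∀ L, prev' ≤ L → L ≤ p → g L = e' + (L - prev') * r') ∧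
         k < e' + (p - prev') * r')) := by
  intro pos
  induction pos with
  | nil =>
    intro e prev r hr hprev he _ _ hinv
    have hr0 : r = 0 := by simpa using hr
    subst hr0
    refine ⟨e, prev, 0, rfl, hprev, he, Or.inl ⟨rfl, ?_⟩⟩
    intro L hL
    have := hinv L hL
    simp [SF] at this
    omega
  | cons p rest ih =>
    intro e prev r hr hprev he hpw hge hinv
    have hpp : prev ≤ p := hge p (by simp)
    have hrest : ∀ x ∈ rest, p ≤ x := fun x hx => (List.pairwise_cons.mp hpw).1 x hx
    have hr1 : (1 : Int) ≤ r := by simp [List.length_cons] at hr; omega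
    rw [bSweep]
    by_cases hb : k < e + (p - prev) * r
    · rw [if_pos hb]
      refine ⟨e, prev, r, rfl, hprev, he, Or.inr ⟨p, hr1, hpp, ?_, hb⟩⟩
      intro L hL hLp
      have hseg : SF (p :: rest) L = ((p :: rest).length : Int) * L := by
        refine SF_all_ge L (p :: rest) ?_
        intro f hf
        rcases List.mem_cons.mp hf with h | h
        · omega
        · have := hrest f h; omega
      rw [hinv L hL, hseg, ← hr]; ring
    · rw [if_neg hb]
      refine ih (e + (p - prev) * r) p (r - 1) (by simp [List.length_cons] at hr ⊢; omega)
        (by omega) (by omega) (List.pairwise_cons.mp hpw).2 hrest ?_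
      intro L hL
      have h1 := hinv L (by omega)
      simp only [SF, List.map_cons, List.sum_cons] at h1
      have hminp : min p L = p := by omega
      rw [hminp] at h1
      have h2 : g L = (e - r * prev) + p + SF rest L := by rw [h1, SF]; ring
      rw [h2]; ring

theorem sum_nonpos_of (l : List Int) (h : ∀ x ∈ l, x ≤ 0) : l.sum ≤ 0 := by
  induction l with
  | nil => simp
  | cons x rest ih =>
    have hx := h x (by simp)
    have := ih (fun y hy => h y (by simp [hy]))
    simp only [List.sum_cons]
    omega

-- inside D_ the bound 10^9 itself still fits, so A's capped search ends at exactly 10^9 laps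
theorem aLoop_allfit (ft : List Int) (k : Int) :
    ∀ n : Nat, ∀ low high laps total : Int, (high + 1 - low).toNat = n →
    low ≤ high → SF ft high ≤ k →
    aLoop ft k low high laps total = (high, SF ft high) := by
  intro n
  induction n using Nat.strong_induction_on with
  | _ n ih =>
    intro low high laps total hn hlh hkh
    rw [aLoop, dif_pos hlh]
    have hmid := PySem.Int.floordiv_two_mid_bounds hlh
    set mid := PySem.Int.floordiv (low + high) 2
    rw [aTimes_eq]
    have hmk : SF ft mid ≤ k := le_trans (SF_mono ft (by omega)) hkh
    rw [if_pos hmk]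
    by_cases hmh : mid + 1 ≤ high
    · exact ih (high + 1 - (mid + 1)).toNat (by omega) (mid + 1) high mid (SF ft mid) rfl hmh hkh
    · have hme : mid = high := by omega
      rw [aLoop, dif_neg (by omega), hme]

-- the two final walks agree: A counts total up to k, B counts rem = k - total down to 0
theorem walk_eq (k laps : Int) : ∀ ft : List Int, ∀ i total : Int,
    aWalk (ft.map (fun t => t - laps)) i k total = bWalk ft i laps (k - total) := by
  intro ft
  induction ft with
  | nil => intro i total; simp [aWalk, bWalk]
  | cons f rest ih =>
    intro i total
    simp only [List.map_cons, aWalk, bWalk]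
    by_cases h : f - laps ≤ 0
    · rw [if_pos h, if_neg (show ¬ laps < f by omega), ih]
    · rw [if_neg h, if_pos (show laps < f by omega)]
      by_cases ht : total = k
      · rw [if_pos (show 0 < f - laps ∧ total = k from ⟨by omega, ht⟩),
            if_pos (show k - total = 0 by omega)]
      · rw [if_neg (show ¬ (0 < f - laps ∧ total = k) from fun hc => ht hc.2),
            if_neg (show ¬ k - total = 0 by omega), ih]
        congr 1
        ring

-- a negative rem never reaches 0
theorem bWalk_neg (laps : Int) : ∀ ft : List Int, ∀ i rem : Int, rem < 0 →
    bWalk ft i laps rem = -1 := by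
  intro ft
  induction ft with
  | nil => intro i rem _; simp [bWalk]
  | cons f rest ih =>
    intro i rem hrem
    rw [bWalk]
    by_cases h : laps < f
    · rw [if_pos h, if_neg (by omega), ih _ _ (by omega)]
    · rw [if_neg h, ih _ _ hrem]

-- stepping the level by one adds one second per food still above it
theorem SF_succ_count (ft : List Int) (L : Int) :
    SF ft (L + 1) = SF ft L + ((ft.countP (fun t => decide (L < t)) : Nat) : Int) := by
  induction ft with
  | nil => simp [SF]
  | cons f rest ih =>
    simp only [SF, List.map_cons, List.sum_cons, List.countP_cons] at *
    by_cases h : L < f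
    · simp only [h, decide_true]
      have h1 : min f (L + 1) = min f L + 1 := by omega
      push_cast
      omega
    · simp only [h, decide_false]
      have h1 : min f (L + 1) = min f L := by omega
      push_cast
      omega

-- a remainder at least the number of survivors never reaches 0
theorem bWalk_none_of_ge : ∀ ft : List Int, ∀ i laps rem : Int,
    ((ft.countP (fun t => decide (laps < t)) : Nat) : Int) ≤ rem → bWalk ft i laps rem = -1 := by
  intro ft
  induction ft with
  | nil => intro i laps rem _; simp [bWalk]
  | cons f rest ih =>
    intro i laps rem hc
    simp only [List.countP_cons] at hc
    rw [bWalk]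
    by_cases h : laps < f
    · simp only [h, decide_true] at hc
      push_cast at hc
      rw [if_pos h, if_neg (by omega), ih _ _ _ (by omega)]
    · simp only [h, decide_false] at hc
      push_cast at hc
      rw [if_neg h, ih _ _ _ (by omega)]

-- a remainder below the number of survivors hits one of them
theorem bWalk_pos : ∀ ft : List Int, ∀ i laps rem : Int, 0 ≤ i → 0 ≤ rem →
    rem < ((ft.countP (fun t => decide (laps < t)) : Nat) : Int) → 0 < bWalk ft i laps rem := by
  intro ft
  induction ft with
  | nil => intro i laps rem _ _ hc; simp at hc; omega
  | cons f rest ih =>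
    intro i laps rem hi hr hc
    simp only [List.countP_cons] at hc
    rw [bWalk]
    by_cases h : laps < f
    · simp only [h, decide_true] at hc
      push_cast at hc
      rw [if_pos h]
      by_cases h0 : rem = 0
      · rw [if_pos h0]; omega
      · rw [if_neg h0]
        exact ih (i + 1) laps (rem - 1) (by omega) (by omega) (by omega)
    · simp only [h, decide_false] at hc
      push_cast at hc
      rw [if_neg h]
      exact ih (i + 1) laps rem (by omega) hr (by omega)

-- B in the main case: it walks with the true maximal lap count l and remainder k - SF ft l
theorem alt_eval (ft : List Int) (k : Int) (hks : ¬ ft.sum ≤ k)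
    (hkb : (ft.filter (fun t => t ≤ 0)).sum ≤ k) :
    ∃ l, solution_alt ft k = bWalk ft 0 l (k - SF ft l) ∧ 0 ≤ l ∧ SF ft l ≤ k ∧
      ∀ L, l < L → k < SF ft L := by
  unfold solution_alt
  rw [if_neg hks, if_neg (by omega)]
  have hperm := PySem.List.sorted_perm (ft.filter (fun t => 0 < t)) (fun x => x) false
  have hpw : (PySem.List.sorted (ft.filter (fun t => 0 < t)) (fun x => x) false).Pairwise
      (· ≤ ·) := PySem.List.sorted_pairwise (ft.filter (fun t => 0 < t)) (fun x => x)
  obtain ⟨e', prev', r', hsw, hprev', he', hcase⟩ :=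
    bSweep_spec (SF ft) k (PySem.List.sorted (ft.filter (fun t => 0 < t)) (fun x => x) false)
      ((ft.filter (fun t => t ≤ 0)).sum) 0 _ rfl le_rfl hkb hpw
      (by
        intro p hp
        have hmem : p ∈ ft.filter (fun t => 0 < t) := hperm.mem_iff.mp hp
        have := (List.mem_filter.mp hmem).2
        simp at this; omega)
      (by
        intro L hL
        rw [SF_split ft L hL, SF_perm hperm L]
        ring)
  rw [hsw]
  rcases hcase with ⟨_, hflat⟩ | ⟨p, hr1, hpp, hseg, hbreak⟩
  · -- all food consumed would mean sum ≤ k, contradicting k < sum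
    exfalso
    obtain ⟨hub1, hub2⟩ := ubOf_spec prev' ft
    have h1 := hflat (ubOf prev' ft) hub1
    rw [SF_all_le _ ft hub2] at h1
    omega
  · have hq0 : 0 ≤ PySem.Int.floordiv (k - e') r' :=
      (PySem.Int.le_floordiv_iff_mul_le (by omega)).mpr (by omega)
    have hql : PySem.Int.floordiv (k - e') r' * r' ≤ k - e' :=
      (PySem.Int.le_floordiv_iff_mul_le (by omega)).mp le_rfl
    have hqu : k - e' < (PySem.Int.floordiv (k - e') r' + 1) * r' :=
      (PySem.Int.floordiv_lt_iff_lt_mul (by omega)).mp (by omega)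
    have hlp : PySem.Int.floordiv (k - e') r' < p - prev' :=
      (PySem.Int.floordiv_lt_iff_lt_mul (a := k - e') (b := r') (q := p - prev')
        (by omega)).mpr (by omega)
    set l := prev' + PySem.Int.floordiv (k - e') r' with hl
    have hSl : SF ft l = e' + (l - prev') * r' := hseg l (by omega) (by omega)
    have hSle : SF ft l ≤ k := by rw [hSl]; nlinarith [hql]
    have hSl1 : k < SF ft (l + 1) := by
      rw [hseg (l + 1) (by omega) (by omega)]
      nlinarith [hqu]
    refine ⟨l, ?_, by omega, hSle, ?_⟩
    · rw [hSl]
    · intro L hL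
      have := SF_mono ft (show l + 1 ≤ L by omega)
      omega

-- ===== VERDICT (by name: the statement is the Claim_ definition above) =====
theorem solution_spec : Claim_unchanged_solution := by
  intro ft k _
  unfold Spec_solution
  intro hD
  have hpos0 : SF (ft.filter (fun t => 0 < t)) 0 = 0 := by
    rw [SF_all_ge 0 _ (by intro f hf; have := (List.mem_filter.mp hf).2; simp at this; omega)]
    ring
  have hbase : (ft.filter (fun t => t ≤ 0)).sum = SF ft 0 := by
    have := SF_split ft 0 le_rfl
    omega
  have hbase0 : (ft.filter (fun t => t ≤ 0)).sum ≤ 0 := by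
    refine sum_nonpos_of _ ?_
    intro x hx
    have := (List.mem_filter.mp hx).2
    simpa using this
  by_cases hks : ft.sum ≤ k
  · unfold solution solution_alt
    rw [if_pos hks, if_pos hks]
  · by_cases hkb : k < (ft.filter (fun t => t ≤ 0)).sum
    · -- A's search never fits: laps = 0, total = 0; both walks return -1
      unfold solution solution_alt
      rw [if_neg hks, if_neg hks, if_pos hkb]
      rw [aLoop_none ft k (by omega) ((1000000000 : Int) + 1 - 0).toNat 0 1000000000 0 0 rfl le_rfl]
      have := walk_eq k 0 ft 0 0
      simp only []
      rw [this, bWalk_neg 0 ft 0 (k - 0) (by omega)]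
    · push_neg at hkb
      have hk0 : SF ft 0 ≤ k := by omega
      have hDl : k < SF ft 1000000001 := by
        by_contra hc
        exact hD ⟨by omega, by unfold SF at hc; omega⟩
      obtain ⟨lA, hA, hlA0, hAle, hAgt⟩ :=
        aLoop_spec ft k hk0 ((1000000000 : Int) + 1 - 0).toNat 0 1000000000 0 0 rfl le_rfl
          (by norm_num)
          (by intro L hL; have := SF_mono ft (show (1000000001 : Int) ≤ L by omega); omega)
          (by intro h; omega)
          (fun _ => ⟨rfl, rfl⟩)
      obtain ⟨lB, hBalt, hlB0, hBle, hBgt⟩ := alt_eval ft k hks hkb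
      -- uniqueness of the maximal lap count
      have hlAB : lA = lB := by
        by_contra hne
        rcases lt_or_gt_of_ne hne with hlt | hgt
        · have := hAgt lB hlt; omega
        · have := hBgt lA hgt; omega
      unfold solution
      rw [if_neg hks, hA, hlAB, hBalt]
      show aWalk (ft.map (fun t => t - lB)) 0 k (SF ft lB) = bWalk ft 0 lB (k - SF ft lB)
      rw [walk_eq k lB ft 0 (SF ft lB)]

theorem solution_changed : Claim_changed_solution := by
  unfold Claim_changed_solution
  refine ⟨by decide, by decide, ?_, by decide, by decide⟩
  show solution [2000000002] 2000000001 = -1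
  unfold solution
  rw [if_neg (by decide),
    aLoop_allfit [2000000002] 2000000001 ((1000000000 : Int) + 1 - 0).toNat 0 1000000000 0 0 rfl
      (by decide) (by decide)]
  decide

theorem solution_tight : Claim_exact_solution := by
  intro ft k _ hd
  obtain ⟨hd1, hd2⟩ := hd
  have hD1 : SF ft 1000000001 ≤ k := by unfold SF; exact hd2
  have hks : ¬ ft.sum ≤ k := by omega
  have hk9 : SF ft 1000000000 ≤ k := le_trans (SF_mono ft (by norm_num)) hD1
  have hcount := SF_succ_count ft 1000000000
  have he1 : (1000000000 : Int) + 1 = 1000000001 := by norm_num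
  rw [he1] at hcount
  have hA : solution ft k = -1 := by
    unfold solution
    rw [if_neg hks,
      aLoop_allfit ft k ((1000000000 : Int) + 1 - 0).toNat 0 1000000000 0 0 rfl (by norm_num) hk9]
    show aWalk (ft.map (fun t => t - 1000000000)) 0 k (SF ft 1000000000) = -1
    rw [walk_eq k 1000000000 ft 0 (SF ft 1000000000)]
    exact bWalk_none_of_ge ft 0 1000000000 _ (by omega)
  have hkb : (ft.filter (fun t => t ≤ 0)).sum ≤ k := by
    have h1 := SF_split ft 0 le_rfl
    have h2 : SF (ft.filter (fun t => 0 < t)) 0 = 0 := by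
      rw [SF_all_ge 0 _ (by intro f hf; have := (List.mem_filter.mp hf).2; simp at this; omega)]
      ring
    have h3 : SF ft 0 ≤ SF ft 1000000001 := SF_mono ft (by norm_num)
    omega
  obtain ⟨l, hBalt, hl0, hBle, hBgt⟩ := alt_eval ft k hks hkb
  have hcl := SF_succ_count ft l
  have hl1 := hBgt (l + 1) (by omega)
  have hBpos : 0 < solution_alt ft k := by
    rw [hBalt]
    exact bWalk_pos ft 0 l (k - SF ft l) le_rfl (by omega) (by omega)
  omega
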